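-- pv_equiv track=rewrite | github.com/amandhillon22/chatbot-streamlit | create_lightweight_embeddings.py | _analyze_columns_for_context
-- ===== SOURCE A (Python) =====
-- def _analyze_columns_for_context(columns):
--     """Analyze columns to understand table operations"""
--     context_operations = []
--
--     columns_lower = [col.lower() for col in columns]
--
--     # Detect common operations based on column patterns
--     if any('distance' in col for col in columns_lower):
--         context_operations.append('distance tracking')
--     if any('fuel' in col for col in columns_lower):
--         context_operations.append('fuel management')
--     if any('time' in col or 'date' in col for col in columns_lower):
--         context_operations.append('time-based reporting')
--     if any('status' in col for col in columns_lower):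
--         context_operations.append('status monitoring')
--     if any('amount' in col or 'cost' in col or 'price' in col for col in columns_lower):
--         context_operations.append('financial tracking')
--
--     return ', '.join(context_operations)
-- ===== SOURCE B (Python) =====
-- def _analyze_columns_for_context(columns):
--     """Single pass over columns maintaining boolean flags, then emit labels in fixed order."""
--     has_distance = has_fuel = has_time = has_status = has_financial = False
--     for col in columns:
--         low = col.lower()
--         has_distance = has_distance or 'distance' in low
--         has_fuel = has_fuel or 'fuel' in low
--         has_time = has_time or 'time' in low or 'date' in low
--         has_status = has_status or 'status' in low
--         has_financial = has_financial or 'amount' in low or 'cost' in low or 'price' in low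
--     pairs = [(has_distance, 'distance tracking'),
--              (has_fuel, 'fuel management'),
--              (has_time, 'time-based reporting'),
--              (has_status, 'status monitoring'),
--              (has_financial, 'financial tracking')]
--     return ', '.join(label for flag, label in pairs if flag)
-- ===== Notes on version B (the rewrite author's own statement) =====
-- stated objective: alternative
-- what changed: Replaces five separate any() scans over a precomputed lowercased list with a single traversal that lowercases each column once and ORs substring matches into five boolean flags, then joins the labels whose flag is set in the fixed order.
import Mathlib
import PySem

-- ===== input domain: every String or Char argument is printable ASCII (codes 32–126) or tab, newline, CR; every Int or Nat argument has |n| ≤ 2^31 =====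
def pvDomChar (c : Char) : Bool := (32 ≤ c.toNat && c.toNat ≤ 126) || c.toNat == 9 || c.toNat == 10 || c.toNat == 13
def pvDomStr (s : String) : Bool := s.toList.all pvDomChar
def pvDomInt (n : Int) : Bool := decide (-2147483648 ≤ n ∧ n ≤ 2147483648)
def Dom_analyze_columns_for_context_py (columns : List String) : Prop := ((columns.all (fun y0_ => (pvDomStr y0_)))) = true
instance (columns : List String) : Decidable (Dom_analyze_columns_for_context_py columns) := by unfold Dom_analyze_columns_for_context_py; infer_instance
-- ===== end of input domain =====

-- B replaces A's five separate any() scans with one pass accumulating boolean flags; alternative decomposition, same cost.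

-- ===== PORT A =====
def analyze_columns_for_context_py (columns : List String) : String :=
  let context_operations : List String := []
  let columns_lower := columns.map PySem.Str.lower
  let context_operations :=
    if columns_lower.any (fun col => PySem.Str.isIn "distance" col) then
      context_operations ++ ["distance tracking"] else context_operations
  let context_operations :=
    if columns_lower.any (fun col => PySem.Str.isIn "fuel" col) then
      context_operations ++ ["fuel management"] else context_operations
  let context_operations :=
    if columns_lower.any (fun col => PySem.Str.isIn "time" col || PySem.Str.isIn "date" col) then
      context_operations ++ ["time-based reporting"] else context_operations
  let context_operations :=
    if columns_lower.any (fun col => PySem.Str.isIn "status" col) then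
      context_operations ++ ["status monitoring"] else context_operations
  let context_operations :=
    if columns_lower.any (fun col => PySem.Str.isIn "amount" col || PySem.Str.isIn "cost" col || PySem.Str.isIn "price" col) then
      context_operations ++ ["financial tracking"] else context_operations
  PySem.Str.join ", " context_operations

-- ===== PORT B =====
def pvFlagsStep (s : Bool × Bool × Bool × Bool × Bool) (col : String) : Bool × Bool × Bool × Bool × Bool :=
  let low := PySem.Str.lower col
  (s.1 || PySem.Str.isIn "distance" low,
   s.2.1 || PySem.Str.isIn "fuel" low,
   s.2.2.1 || PySem.Str.isIn "time" low || PySem.Str.isIn "date" low,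
   s.2.2.2.1 || PySem.Str.isIn "status" low,
   s.2.2.2.2 || PySem.Str.isIn "amount" low || PySem.Str.isIn "cost" low || PySem.Str.isIn "price" low)

def analyze_columns_for_context_py_alt (columns : List String) : String :=
  let f := columns.foldl pvFlagsStep (false, false, false, false, false)
  let pairs : List (Bool × String) :=
    [(f.1, "distance tracking"), (f.2.1, "fuel management"), (f.2.2.1, "time-based reporting"),
     (f.2.2.2.1, "status monitoring"), (f.2.2.2.2, "financial tracking")]
  PySem.Str.join ", " ((pairs.filter (fun p => p.1)).map (fun p => p.2))

-- ===== PRECONDITION & SPEC =====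
def Spec_analyze_columns_for_context_py (columns : List String) (out : String) : Prop := out = analyze_columns_for_context_py_alt columns
instance (columns : List String) (out : String) : Decidable (Spec_analyze_columns_for_context_py columns out) := by unfold Spec_analyze_columns_for_context_py; infer_instance

-- ===== CLAIM (what is proved, stated in full; the proofs are below) =====
def Claim_equal_analyze_columns_for_context_py : Prop := ∀ (columns : List String), Dom_analyze_columns_for_context_py columns → Spec_analyze_columns_for_context_py columns (analyze_columns_for_context_py columns)

-- ===== LEMMAS AND PROOFS =====

-- The one-pass fold computes, componentwise, the five any-scans of A.
lemma pvFlags_fold_eq (columns : List String) (s : Bool × Bool × Bool × Bool × Bool) :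
    columns.foldl pvFlagsStep s =
      (s.1 || columns.any (fun c => PySem.Str.isIn "distance" (PySem.Str.lower c)),
       s.2.1 || columns.any (fun c => PySem.Str.isIn "fuel" (PySem.Str.lower c)),
       s.2.2.1 || columns.any (fun c => PySem.Str.isIn "time" (PySem.Str.lower c) || PySem.Str.isIn "date" (PySem.Str.lower c)),
       s.2.2.2.1 || columns.any (fun c => PySem.Str.isIn "status" (PySem.Str.lower c)),
       s.2.2.2.2 || columns.any (fun c => PySem.Str.isIn "amount" (PySem.Str.lower c) || PySem.Str.isIn "cost" (PySem.Str.lower c) || PySem.Str.isIn "price" (PySem.Str.lower c))) := by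
  induction columns generalizing s with
  | nil => simp
  | cons c rest ih =>
    simp only [List.foldl_cons, List.any_cons, ih, pvFlagsStep]
    simp [Bool.or_assoc]

-- ===== VERDICT (by name: the statement is the Claim_ definition above) =====
theorem analyze_columns_for_context_py_spec : Claim_equal_analyze_columns_for_context_py := by
  intro columns _
  unfold Spec_analyze_columns_for_context_py analyze_columns_for_context_py analyze_columns_for_context_py_alt
  rw [pvFlags_fold_eq]
  simp only [List.any_map, Function.comp_def, Bool.false_or]
  cases columns.any (fun c => PySem.Str.isIn "distance" (PySem.Str.lower c)) <;>
  cases columns.any (fun c => PySem.Str.isIn "fuel" (PySem.Str.lower c)) <;>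
  cases columns.any (fun c => PySem.Str.isIn "time" (PySem.Str.lower c) || PySem.Str.isIn "date" (PySem.Str.lower c)) <;>
  cases columns.any (fun c => PySem.Str.isIn "status" (PySem.Str.lower c)) <;>
  cases columns.any (fun c => PySem.Str.isIn "amount" (PySem.Str.lower c) || PySem.Str.isIn "cost" (PySem.Str.lower c) || PySem.Str.isIn "price" (PySem.Str.lower c)) <;>
  simp [List.filter, List.map]
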